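-- pv_equiv track=rewrite | github.com/wzdnzd/leetcode | python3/2733.既不是最小值也不是最大值.py | findNonMinOrMax
-- ===== SOURCE A (Python) =====
-- from typing import List
--
-- def findNonMinOrMax(nums: List[int]) -> int:
--     if len(nums) <= 2:
--         return -1
--
--     min_v, max_v, ans = nums[0], nums[0], nums[0]
--     for num in nums:
--         if num < min_v:
--             ans = min_v
--             min_v = num
--         elif num > max_v:
--             ans = max_v
--             max_v = num
--         else:
--             ans = num
--
--     return ans
-- ===== SOURCE B (Python) =====
-- def findNonMinOrMax(nums):
--     if len(nums) <= 2:
--         return -1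
--     last, rest = nums[-1], nums[:-1]
--     mn, mx = min(rest), max(rest)
--     return mn if last < mn else mx if last > mx else last
-- ===== Notes on version B (the rewrite author's own statement) =====
-- stated objective: simpler
-- what changed: Replaces the stateful three-variable scan with a closed form: min/max of all but the last element, then one comparison with the last element decides the answer.
import Mathlib
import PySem

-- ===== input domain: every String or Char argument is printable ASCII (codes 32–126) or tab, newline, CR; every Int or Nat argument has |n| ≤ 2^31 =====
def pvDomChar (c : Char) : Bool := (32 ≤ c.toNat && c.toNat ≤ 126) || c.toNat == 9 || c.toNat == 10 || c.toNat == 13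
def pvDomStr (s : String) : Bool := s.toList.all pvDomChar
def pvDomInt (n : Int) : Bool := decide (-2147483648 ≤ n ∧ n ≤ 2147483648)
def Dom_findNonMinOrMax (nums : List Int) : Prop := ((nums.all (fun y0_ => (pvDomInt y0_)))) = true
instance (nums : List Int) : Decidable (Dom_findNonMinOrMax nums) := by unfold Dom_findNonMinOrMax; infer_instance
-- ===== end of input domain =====

-- B replaces A's stateful three-variable scan with a closed form (min/max of all but
-- the last element, one comparison with the last element); objective: simpler.


-- ===== PORT A =====
-- one loop step: (min_v, max_v, ans) updated as in A's body
def pvStepA (st : Int × Int × Int) (num : Int) : Int × Int × Int :=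
  if num < st.1 then (num, st.2.1, st.1)
  else if num > st.2.1 then (st.1, num, st.2.1)
  else (st.1, st.2.1, num)

def findNonMinOrMax (nums : List Int) : Int :=
  if nums.length ≤ 2 then -1
  else
    match nums with
    | [] => -1   -- unreachable: length > 2
    | x :: _ => (nums.foldl pvStepA (x, x, x)).2.2

-- ===== PORT B =====
def findNonMinOrMax_alt (nums : List Int) : Int :=
  if nums.length ≤ 2 then -1
  else
    let rest := PySem.List.slice nums none (some (-1))     -- nums[:-1]
    match PySem.List.pyGet? nums (-1),                      -- nums[-1]
          PySem.List.min? rest (fun y => y),                -- min(rest)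
          PySem.List.max? rest (fun y => y) with            -- max(rest)
    | some last, some mn, some mx =>
        if last < mn then mn else if last > mx then mx else last
    | _, _, _ => -1   -- unreachable: length > 2 ⇒ all three are some

-- ===== PRECONDITION & SPEC =====
def Spec_findNonMinOrMax (nums : List Int) (out : Int) : Prop := out = findNonMinOrMax_alt nums
instance (nums : List Int) (out : Int) : Decidable (Spec_findNonMinOrMax nums out) := by unfold Spec_findNonMinOrMax; infer_instance

-- ===== CLAIM (what is proved, stated in full; the proofs are below) =====
def Claim_equal_findNonMinOrMax : Prop := ∀ (nums : List Int), Dom_findNonMinOrMax nums → Spec_findNonMinOrMax nums (findNonMinOrMax nums)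

-- ===== LEMMAS AND PROOFS =====

-- the first two components of A's fold state are the running min and max
theorem pvFold_minmax (l : List Int) (mn mx ans : Int) (h : mn ≤ mx) :
    (l.foldl pvStepA (mn, mx, ans)).1 = l.foldl min mn ∧
    (l.foldl pvStepA (mn, mx, ans)).2.1 = l.foldl max mx := by
  induction l generalizing mn mx ans with
  | nil => exact ⟨rfl, rfl⟩
  | cons y t ih =>
    simp only [List.foldl_cons, pvStepA]
    split_ifs with h1 h2
    · have e1 : min mn y = y := by omega
      have e2 : max mx y = mx := by omega
      rw [e1, e2]; exact ih y mx mn (by omega)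
    · have e1 : min mn y = mn := by omega
      have e2 : max mx y = y := by omega
      rw [e1, e2]; exact ih mn y mx (by omega)
    · have e1 : min mn y = mn := by omega
      have e2 : max mx y = mx := by omega
      rw [e1, e2]; exact ih mn mx y h

theorem pvStepA_self (x : Int) : pvStepA (x, x, x) x = (x, x, x) := by
  simp [pvStepA]

theorem findNonMinOrMax_spec : Claim_equal_findNonMinOrMax := by
  intro nums _
  unfold Spec_findNonMinOrMax findNonMinOrMax findNonMinOrMax_alt
  by_cases hlen : nums.length <= 2
  · simp [hlen]
  · simp only [if_neg hlen]
    rcases nums.eq_nil_or_concat with rfl | ⟨l, y, rfl⟩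
    · simp at hlen
    · simp only [List.concat_eq_append] at hlen ⊢
      obtain ⟨x, t, rfl⟩ : ∃ x t, l = x :: t := by
        cases l with
        | nil => simp at hlen
        | cons a b => exact ⟨a, b, rfl⟩
      -- B's side: nums[-1] = y, nums[:-1] = x :: t
      rw [PySem.List.slice_to_neg_one, PySem.List.pyGet?_neg_one_append_singleton]
      have hdl : ((x :: t) ++ [y]).dropLast = x :: t := List.dropLast_concat
      rw [hdl, PySem.List.min?_id_cons, PySem.List.max?_id_cons]
      -- A's side: reduce the head match and peel the fold
      simp only [List.cons_append]
      have hfold : ((x :: (t ++ [y])).foldl pvStepA (x, x, x)).2.2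
          = (pvStepA (t.foldl pvStepA (x, x, x)) y).2.2 := by
        rw [List.foldl_cons, pvStepA_self, List.foldl_append]
        rfl
      rw [hfold]
      obtain ⟨e1, e2⟩ := pvFold_minmax t x x x le_rfl
      simp only [pvStepA, e1, e2]
      split_ifs <;> rfl

-- ===== VERDICT (by name: the statement is the Claim_ definition above) =====
-- (the verdict theorem findNonMinOrMax_spec is proved above)
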